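-- pv_equiv track=rewrite | github.com/akshayraj-611/Soft_Dev | Assignment_6_3modified.py | encode_secret
-- ===== SOURCE A (Python) =====
-- from string import ascii_lowercase
--
-- secret_mapping = {
--     char: f"cR{char}{idx % 10}"
--     for idx, char in enumerate(ascii_lowercase)
-- }
--
-- def encode_secret(text):
--     encoded = []
--     for ch in text:
--         if ch in secret_mapping:
--             encoded.append(secret_mapping[ch])
--         else:
--             encoded.append(ch)
--     return "".join(encoded)
-- ===== SOURCE B (Python) =====
-- def encode_secret(text):
--     pieces = []
--     n = len(text)
--     i = 0
--     while i < n: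
--         j = i
--         while j < n and not ('a' <= text[j] <= 'z'):
--             j += 1
--         pieces.append(text[i:j])
--         if j < n:
--             ch = text[j]
--             pieces.append(f"cR{ch}{(ord(ch) - 97) % 10}")
--             j += 1
--         i = j
--     return "".join(pieces)
-- ===== Notes on version B (the rewrite author's own statement) =====
-- stated objective: alternative
-- what changed: Drops the precomputed 26-entry mapping dict and the per-character lookup loop: B scans the text with a two-pointer run finder, copies each maximal non-letter run wholesale as a slice, and computes each letter's replacement in closed form from its character code ((ord(ch)-97)%10), maintaining no auxiliary table.
import Mathlib
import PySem

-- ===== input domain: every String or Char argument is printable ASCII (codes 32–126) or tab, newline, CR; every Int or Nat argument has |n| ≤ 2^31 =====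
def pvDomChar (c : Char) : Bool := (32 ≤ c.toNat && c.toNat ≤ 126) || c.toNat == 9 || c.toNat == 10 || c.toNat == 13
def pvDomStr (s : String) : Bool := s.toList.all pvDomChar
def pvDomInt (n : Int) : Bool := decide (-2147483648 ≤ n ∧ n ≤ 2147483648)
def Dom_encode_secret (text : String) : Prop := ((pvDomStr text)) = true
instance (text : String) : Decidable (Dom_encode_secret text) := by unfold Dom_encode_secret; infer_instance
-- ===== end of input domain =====

-- B drops A's precomputed mapping dict and per-character lookup loop: it scans the text with a
-- two-pointer run finder, copies non-letter runs wholesale as slices and computes each letter's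
-- replacement in closed form; objective: alternative.

-- ===== PORT A =====
-- secret_mapping = {char: f"cR{char}{idx % 10}" for idx, char in enumerate(ascii_lowercase)}
def secret_mapping : PySem.Dict Char String :=
  (PySem.List.enumerate "abcdefghijklmnopqrstuvwxyz".toList 0).foldl
    (fun d p => d.insert p.2 ("cR" ++ String.ofList [p.2] ++ PySem.Int.toStr (PySem.Int.mod p.1 10)))
    PySem.Dict.empty

def encode_secret (text : String) : String :=
  let encoded : List String :=
    text.toList.foldl
      (fun acc ch =>
        if secret_mapping.contains ch then acc ++ [secret_mapping.getD ch ""]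
        else acc ++ [String.ofList [ch]])
      []
  PySem.Str.join "" encoded

-- ===== PORT B =====
-- inner while: 'while j < n and not ('a' <= text[j] <= 'z'): j += 1'
-- (text[j] is read with getD; the guard guarantees j < n = text length, so it is in range)
def pvInner (cs : List Char) (n j : Nat) : Nat :=
  if h : j < n ∧ ¬ ('a' ≤ cs.getD j ' ' ∧ cs.getD j ' ' ≤ 'z') then pvInner cs n (j + 1) else j
termination_by n - j
decreasing_by omega

-- the port's termination needs i ≤ pvInner cs n i
theorem pvInner_ge (cs : List Char) (n j : Nat) : j ≤ pvInner cs n j := by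
  unfold pvInner
  split
  · have := pvInner_ge cs n (j + 1); omega
  · omega
termination_by n - j
decreasing_by omega

-- outer while loop: copy text[i:j] (a non-letter run), then encode the letter at j in closed form
-- (f"cR{ch}{(ord(ch)-97)%10}": the digit char is chr(48 + (ord(ch)-97)%10), exact for 'a'..'z')
def pvOuter (cs : List Char) (n i : Nat) (pieces : List String) : List String :=
  if _h : i < n then
    if _hj : pvInner cs n i < n then
      pvOuter cs n (pvInner cs n i + 1)
        (pieces ++ [String.ofList (PySem.List.slice cs (some (i : Int)) (some (pvInner cs n i : Int)))]
          ++ [String.ofList ['c', 'R', cs.getD (pvInner cs n i) ' ',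
              Char.ofNat (48 + ((cs.getD (pvInner cs n i) ' ').toNat - 97) % 10)]])
    else
      pvOuter cs n (pvInner cs n i)
        (pieces ++ [String.ofList (PySem.List.slice cs (some (i : Int)) (some (pvInner cs n i : Int)))])
  else pieces
termination_by n - i
decreasing_by
  · have := pvInner_ge cs n i; omega
  · omega

def encode_secret_alt (text : String) : String :=
  PySem.Str.join "" (pvOuter text.toList text.toList.length 0 [])

-- ===== PRECONDITION & SPEC =====
def Spec_encode_secret (text : String) (out : String) : Prop := out = encode_secret_alt text
instance (text : String) (out : String) : Decidable (Spec_encode_secret text out) := by unfold Spec_encode_secret; infer_instance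

-- ===== CLAIM =====
def Claim_equal_encode_secret : Prop := ∀ (text : String), Dom_encode_secret text → Spec_encode_secret text (encode_secret text)

-- ===== LEMMAS AND PROOFS =====

-- per-character replacement, list-of-chars form
def encBL (c : Char) : List Char :=
  if 'a' ≤ c ∧ c ≤ 'z' then ['c', 'R', c, Char.ofNat (48 + (c.toNat - 97) % 10)] else [c]

def encBstr (c : Char) : String := String.ofList (encBL c)

-- A's per-character result
def encA (ch : Char) : String :=
  if secret_mapping.contains ch then secret_mapping.getD ch "" else String.ofList [ch]

set_option maxRecDepth 4096 in
theorem encA_eq_encB_small : ∀ n : Fin 127, encA (Char.ofNat n.val) = encBstr (Char.ofNat n.val) := by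
  decide

theorem encA_eq_encB (c : Char) (h : pvDomChar c = true) : encA c = encBstr c := by
  have hlt : c.toNat < 127 := by
    simp [pvDomChar] at h
    omega
  have := encA_eq_encB_small ⟨c.toNat, hlt⟩
  simpa [Char.ofNat_toNat] using this

-- flatten of the encodings / of the pieces
def pvE (l : List Char) : List Char := (l.map encBL).flatten
def pvJ (l : List String) : List Char := (l.map String.toList).flatten

theorem intercalate_nil_sep (L : List (List Char)) : ([] : List Char).intercalate L = L.flatten := by
  induction L with
  | nil => rfl
  | cons x xs ih =>
    cases xs with
    | nil => simp [List.intercalate]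
    | cons y ys =>
      simp [List.intercalate, List.intersperse] at *
      simpa using ih

theorem join_toList (l : List String) : (PySem.Str.join "" l).toList = pvJ l := by
  simp [PySem.Str.join, PySem.Chars.join, pvJ, intercalate_nil_sep]

theorem pvJ_append (p q : List String) : pvJ (p ++ q) = pvJ p ++ pvJ q := by
  simp [pvJ]

-- pvInner stops either at n or on a letter, and skips only non-letters
theorem pvInner_le (cs : List Char) (n j : Nat) (h : j ≤ n) : pvInner cs n j ≤ n := by
  unfold pvInner
  split
  · exact pvInner_le cs n (j + 1) (by omega)
  · omega
termination_by n - j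
decreasing_by omega

theorem pvInner_stop (cs : List Char) (n j : Nat) (h : pvInner cs n j < n) :
    'a' ≤ cs.getD (pvInner cs n j) ' ' ∧ cs.getD (pvInner cs n j) ' ' ≤ 'z' := by
  by_cases hc : j < n ∧ ¬ ('a' ≤ cs.getD j ' ' ∧ cs.getD j ' ' ≤ 'z')
  · rw [pvInner, dif_pos hc] at h ⊢
    exact pvInner_stop cs n (j + 1) h
  · rw [pvInner, dif_neg hc] at h ⊢
    by_contra hL
    exact hc ⟨h, hL⟩
termination_by n - j
decreasing_by omega

-- the run skipped by pvInner contributes its characters unchanged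
theorem pvInner_run (cs : List Char) (n j : Nat) (hn : n = cs.length) (h : j ≤ n) :
    pvE (cs.drop j) = (cs.drop j).take (pvInner cs n j - j) ++ pvE (cs.drop (pvInner cs n j)) := by
  rw [pvInner]
  split
  · rename_i hc
    obtain ⟨hjn, hnl⟩ := hc
    have hj : j < cs.length := by omega
    have hdrop : cs.drop j = cs[j] :: cs.drop (j + 1) := List.drop_eq_getElem_cons hj
    have hgd : cs.getD j ' ' = cs[j] := List.getD_eq_getElem cs ' ' hj
    have hge := pvInner_ge cs n (j + 1)
    have ih := pvInner_run cs n (j + 1) hn (by omega)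
    rw [hdrop]
    have henc : encBL cs[j] = [cs[j]] := by
      unfold encBL
      rw [if_neg]
      rw [hgd] at hnl
      exact hnl
    have htake : (cs[j] :: cs.drop (j + 1)).take (pvInner cs n (j + 1) - j) =
        cs[j] :: (cs.drop (j + 1)).take (pvInner cs n (j + 1) - (j + 1)) := by
      have : pvInner cs n (j + 1) - j = (pvInner cs n (j + 1) - (j + 1)) + 1 := by omega
      rw [this, List.take_succ_cons]
    rw [htake, show pvE (cs[j] :: cs.drop (j + 1)) = encBL cs[j] ++ pvE (cs.drop (j + 1)) from rfl,
       henc, ih]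
    simp
  · simp
termination_by n - j
decreasing_by omega

theorem pvOuter_spec (cs : List Char) (n i : Nat) (pieces : List String)
    (hn : n = cs.length) (h : i ≤ n) :
    pvJ (pvOuter cs n i pieces) = pvJ pieces ++ pvE (cs.drop i) := by
  rw [pvOuter]
  by_cases hin : i < n
  · rw [dif_pos hin]
    have hge := pvInner_ge cs n i
    have hle := pvInner_le cs n i h
    have hslice : PySem.List.slice cs (some (i : Int)) (some (pvInner cs n i : Int)) =
        (cs.drop i).take (pvInner cs n i - i) := PySem.List.slice_natCast cs i (pvInner cs n i)
    have hrun := pvInner_run cs n i hn h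
    by_cases hjn : pvInner cs n i < n
    · rw [dif_pos hjn]
      have hlt : pvInner cs n i < cs.length := by omega
      have hgd : cs.getD (pvInner cs n i) ' ' = cs[pvInner cs n i] :=
        List.getD_eq_getElem cs ' ' hlt
      have hlet := pvInner_stop cs n i (by omega)
      have henc : encBL cs[pvInner cs n i] =
          ['c', 'R', cs[pvInner cs n i],
            Char.ofNat (48 + (cs[pvInner cs n i].toNat - 97) % 10)] := by
        unfold encBL
        rw [if_pos]
        rw [hgd] at hlet
        exact hlet
      have hdropj : cs.drop (pvInner cs n i) = cs[pvInner cs n i] :: cs.drop (pvInner cs n i + 1) :=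
        List.drop_eq_getElem_cons hlt
      rw [pvOuter_spec cs n (pvInner cs n i + 1) _ hn (by omega), hrun, hdropj,
        show pvE (cs[pvInner cs n i] :: cs.drop (pvInner cs n i + 1)) =
          encBL cs[pvInner cs n i] ++ pvE (cs.drop (pvInner cs n i + 1)) from rfl,
        henc]
      have hgd' : cs[pvInner cs n i]?.getD ' ' = cs[pvInner cs n i] := by
        simpa [List.getD] using hgd
      simp [pvJ_append, pvJ, hslice, hgd']
    · rw [dif_neg hjn]
      rw [pvOuter_spec cs n (pvInner cs n i) _ hn (by omega), hrun]
      have hnil : cs.drop (pvInner cs n i) = [] := by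
        apply List.drop_eq_nil_of_le; omega
      rw [hnil]
      simp [pvJ_append, pvJ, pvE, hslice]
  · rw [dif_neg hin]
    have : cs.drop i = [] := by
      apply List.drop_eq_nil_of_le; omega
    simp [this, pvE]
termination_by n - i
decreasing_by
  all_goals have := pvInner_ge cs n i
  all_goals omega

theorem encode_secret_spec : Claim_equal_encode_secret := by
  intro text hdom
  unfold Spec_encode_secret encode_secret encode_secret_alt
  have hfold :
      text.toList.foldl
        (fun acc ch =>
          if secret_mapping.contains ch then acc ++ [secret_mapping.getD ch ""]
          else acc ++ [String.ofList [ch]]) [] =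
      text.toList.map encA := by
    have : ∀ (l : List Char) (acc : List String),
        l.foldl
          (fun acc ch =>
            if secret_mapping.contains ch then acc ++ [secret_mapping.getD ch ""]
            else acc ++ [String.ofList [ch]]) acc = acc ++ l.map encA := by
      intro l
      induction l with
      | nil => intro acc; simp
      | cons x xs ih =>
        intro acc
        simp only [List.foldl_cons, List.map_cons, ih, encA]
        split <;> simp
    simpa using this text.toList []
  rw [hfold]
  have hmap : text.toList.map encA = text.toList.map encBstr := by
    apply List.map_congr_left
    intro c hc
    apply encA_eq_encB
    simp only [Dom_encode_secret, pvDomStr, List.all_eq_true] at hdom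
    exact hdom c hc
  rw [hmap]
  apply String.toList_injective
  rw [join_toList, join_toList, pvOuter_spec text.toList text.toList.length 0 [] rfl (by omega)]
  have hcomp : String.toList ∘ encBstr = encBL := funext fun c => by simp [encBstr]
  simp [pvJ, pvE, List.map_map, hcomp]
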